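-- pv_equiv track=rewrite | github.com/FEniCS/ffcx | test/uflacs/unit/test_ufc_backend.py | extract_function
-- ===== SOURCE A (Python) =====
-- def extract_function(name, code):
--     lines = code.split("\n")
--     n = len(lines)
--     begin = None
--     body = None
--     for i in range(n):
--         if (name + "(") in lines[i]:
--             for j in range(i, n):
--                 if lines[j] == "{":
--                     begin = i
--                     body = j
--                     break
--             break
--     if begin is None:
--         return "didnt find %s" % (name,)
--     end = n
--     for i in range(body, n):
--         if lines[i] == "}":
--             end = i + 1
--             break
--     sublines = lines[begin:end]
--     return '\n'.join(sublines)
-- ===== SOURCE B (Python) =====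
-- def extract_function(name, code):
--     needle = name + "("
--     state = 0  # 0: seeking name line, 1: seeking "{", 2: seeking "}"
--     out = []
--     for line in code.split("\n"):
--         if state == 0:
--             if needle in line:
--                 out.append(line)
--                 state = 1
--         else:
--             out.append(line)
--             if state == 1:
--                 if line == "{":
--                     state = 2
--             elif line == "}":
--                 break
--     if state == 2:
--         return "\n".join(out)
--     return "didnt find %s" % (name,)
-- ===== Notes on version B (the rewrite author's own statement) =====
-- stated objective: simpler
-- what changed: A's three sequential index scans (find the name line, scan forward for '{', scan again for '}') followed by a list slice are replaced by one pass over the lines with a three-phase state machine that appends output lines directly as it goes.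
import Mathlib
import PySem

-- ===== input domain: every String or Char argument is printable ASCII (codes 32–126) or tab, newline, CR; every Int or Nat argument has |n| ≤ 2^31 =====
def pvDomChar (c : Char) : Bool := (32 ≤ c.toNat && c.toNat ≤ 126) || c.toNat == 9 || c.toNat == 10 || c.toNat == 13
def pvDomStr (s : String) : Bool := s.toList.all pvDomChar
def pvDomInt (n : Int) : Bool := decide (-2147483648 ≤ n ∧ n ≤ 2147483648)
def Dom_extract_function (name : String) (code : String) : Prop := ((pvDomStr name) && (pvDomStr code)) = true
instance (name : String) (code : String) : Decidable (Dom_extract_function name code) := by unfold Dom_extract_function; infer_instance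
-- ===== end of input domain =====

-- B replaces A's three sequential index loops (find name, find "{", find "}", then slice)
-- by one pass with a three-phase state machine that accumulates the output lines directly
-- (objective: simpler single traversal; same O(n) cost, no speed claim).

-- ===== PORT A =====
-- code.split("\n"): "\n" ≠ "" so PySem.Str.split? is always `some`; getD [] is unreachable.
def pySplitNL (code : String) : List String := (PySem.Str.split? code "\n").getD []

-- Python's inner loop 'for j in range(i, n): if lines[j] == "{": body = j; break' — the index
-- pair (i, j) is represented by the decomposition (lines[i:j], suffix starting at j).
def loopA_inner : List String → Option (List String × List String)
  | [] => none
  | l :: ls =>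
    if l = "{" then some ([], l :: ls)
    else
      match loopA_inner ls with
      | none => none
      | some (pre, b) => some (l :: pre, b)

-- outer loop 'for i in range(n)': break at the first line containing name + "(".
def loopA_outer (needle : String) : List String → Option (List String × List String)
  | [] => none
  | l :: ls => if PySem.Str.isIn needle l then loopA_inner (l :: ls) else loopA_outer needle ls

-- 'for i in range(body, n): if lines[i] == "}": end = i + 1; break' — returns end - body.
def loopA_close : List String → Nat
  | [] => 0
  | l :: ls => if l = "}" then 1 else 1 + loopA_close ls

def extract_function (name : String) (code : String) : String :=
  let lines := pySplitNL code
  match loopA_outer (name ++ "(") lines with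
  | none => "didnt find " ++ name
  | some (pre, b) => PySem.Str.join "\n" (pre ++ List.take (loopA_close b) b)

-- ===== PORT B =====
-- B's single for-loop with the state variable and the accumulating 'out' list.
def loopB (needle : String) (state : Nat) (out : List String) : List String → Nat × List String
  | [] => (state, out)
  | l :: ls =>
    if state = 0 then
      if PySem.Str.isIn needle l then loopB needle 1 (out ++ [l]) ls
      else loopB needle 0 out ls
    else
      let out' := out ++ [l]
      if state = 1 then loopB needle (if l = "{" then 2 else 1) out' ls
      else if l = "}" then (2, out')   -- break
      else loopB needle 2 out' ls

def extract_function_alt (name : String) (code : String) : String :=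
  let p := loopB (name ++ "(") 0 [] (pySplitNL code)
  if p.1 = 2 then PySem.Str.join "\n" p.2 else "didnt find " ++ name

-- ===== PRECONDITION & SPEC =====
def Spec_extract_function (name : String) (code : String) (out : String) : Prop := out = extract_function_alt name code
instance (name : String) (code : String) (out : String) : Decidable (Spec_extract_function name code out) := by unfold Spec_extract_function; infer_instance

-- ===== CLAIM (what is proved, stated in full; the proofs are below) =====
def Claim_equal_extract_function : Prop := ∀ (name : String) (code : String), Dom_extract_function name code → Spec_extract_function name code (extract_function name code)

-- ===== LEMMAS AND PROOFS =====

-- proof-side views of the two pipelines on the line list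
def resA (needle : String) (lines : List String) : Option (List String) :=
  match loopA_outer needle lines with
  | none => none
  | some (pre, b) => some (pre ++ List.take (loopA_close b) b)

def resB (needle : String) (lines : List String) : Option (List String) :=
  let p := loopB needle 0 [] lines
  if p.1 = 2 then some p.2 else none

lemma brace_not_needle (name : String) : PySem.Str.isIn (name ++ "(") "{" = false := by
  cases h : PySem.Str.isIn (name ++ "(") "{" with
  | false => rfl
  | true =>
    rw [PySem.Str.isIn_iff_infix] at h
    obtain ⟨s, t, hst⟩ := h
    -- '(' occurs in the needle, hence in "{".toList = ['{'] — impossible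
    have hmem : '(' ∈ "{".toList := by
      rw [← hst]; simp [String.toList_append]
    simp at hmem

lemma loopB_state2 (needle : String) (v : List String) (out : List String) :
    loopB needle 2 out v = (2, out ++ List.take (loopA_close v) v) := by
  induction v generalizing out with
  | nil => simp [loopB, loopA_close]
  | cons l ls ih =>
    by_cases h : l = "}"
    · simp [loopB, loopA_close, h]
    · simp only [loopB, loopA_close, if_neg h, ih]
      rw [Nat.add_comm, List.take_succ_cons]
      simp

lemma loopB_state1 (needle : String) (t : List String) (out : List String) :
    loopB needle 1 out t =
      match loopA_inner t with
      | none => (1, out ++ t)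
      | some (pre, b) => (2, out ++ pre ++ List.take (loopA_close b) b) := by
  induction t generalizing out with
  | nil => simp [loopB, loopA_inner]
  | cons l ls ih =>
    by_cases h : l = "{"
    · subst h
      simp only [loopB, loopA_inner, if_true]
      rw [loopB_state2]
      have hne : ("{" : String) ≠ "}" := by decide
      simp only [loopA_close, if_neg hne]
      rw [Nat.add_comm, List.take_succ_cons]
      simp [List.append_assoc]
    · simp only [loopB, loopA_inner, if_neg h]
      rw [ih]
      cases hinner : loopA_inner ls with
      | none => simp [List.append_assoc]
      | some pb =>
        obtain ⟨pre, b⟩ := pb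
        simp [List.append_assoc]

lemma res_eq (needle : String) (hn : PySem.Str.isIn needle "{" = false) (lines : List String) :
    resA needle lines = resB needle lines := by
  induction lines with
  | nil => simp [resA, resB, loopA_outer, loopB]
  | cons l ls ih =>
    by_cases h : PySem.Str.isIn needle l = true
    · have hl : l ≠ "{" := by
        intro rfl'; rw [rfl'] at h; rw [hn] at h; exact Bool.false_ne_true h
      simp only [resA, resB, loopA_outer, loopB, if_pos h]
      simp only [loopA_inner, if_neg hl]
      rw [loopB_state1]
      cases hinner : loopA_inner ls with
      | none => simp
      | some pb =>
        obtain ⟨pre, b⟩ := pb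
        simp
    · have h' : PySem.Str.isIn needle l = false := Bool.eq_false_iff.mpr h
      simp only [resA, resB, loopA_outer, loopB, h', Bool.false_eq_true, if_false] at ih ⊢
      exact ih

lemma extract_eq (name code : String) :
    extract_function name code = extract_function_alt name code := by
  have h := res_eq (name ++ "(") (brace_not_needle name) (pySplitNL code)
  unfold extract_function extract_function_alt
  unfold resA resB at h
  cases hA : loopA_outer (name ++ "(") (pySplitNL code) with
  | none =>
    rw [hA] at h
    simp only at h
    split at h
    · exact absurd h (by simp)
    · simp_all
  | some pb =>
    obtain ⟨pre, b⟩ := pb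
    rw [hA] at h
    simp only at h
    split at h
    · simp_all
    · exact absurd h (by simp)

-- ===== VERDICT (by name: the statement is the Claim_ definition above) =====
theorem extract_function_spec : Claim_equal_extract_function := by
  intro name code _
  unfold Spec_extract_function
  exact extract_eq name code
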